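-- pv_equiv track=rewrite | github.com/DCallaz/flitsr | src/parallel.py | merge_rankings
-- ===== SOURCE A (Python) =====
-- def merge_rankings(rankings):
--     single = []
--     for rank in rankings:
--         val = 2**64
--         i = 0
--         score = rank[i][0]
--         for i in range(len(rank)):
--             if (rank[i][0] != score):
--                 score = rank[i][0]
--                 val -= 1
--             single.append((val, rank[i][1], rank[i][2]))
--     return single
-- ===== SOURCE B (Python) =====
-- def merge_rankings(rankings):
--     def groups(rank):
--         # split rank into maximal runs of equal first component
--         res = []
--         i = 0
--         while i < len(rank):
--             j = i
--             while j < len(rank) and rank[j][0] == rank[i][0]: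
--                 j += 1
--             res.append(rank[i:j])
--             i = j
--         return res
--     single = []
--     for rank in rankings:
--         for g, grp in enumerate(groups(rank)):
--             single += [(2**64 - g, a, b) for _, a, b in grp]
--     return single
-- ===== Notes on version B (the rewrite author's own statement) =====
-- stated objective: alternative
-- what changed: B first splits each rank into maximal runs of equal score and assigns each run the value 2**64 minus its run index, instead of A's single pass with a running score/val accumulator (A raises IndexError on an empty rank, which Pre_ excludes; B's grouping simply skips it).
import Mathlib
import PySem

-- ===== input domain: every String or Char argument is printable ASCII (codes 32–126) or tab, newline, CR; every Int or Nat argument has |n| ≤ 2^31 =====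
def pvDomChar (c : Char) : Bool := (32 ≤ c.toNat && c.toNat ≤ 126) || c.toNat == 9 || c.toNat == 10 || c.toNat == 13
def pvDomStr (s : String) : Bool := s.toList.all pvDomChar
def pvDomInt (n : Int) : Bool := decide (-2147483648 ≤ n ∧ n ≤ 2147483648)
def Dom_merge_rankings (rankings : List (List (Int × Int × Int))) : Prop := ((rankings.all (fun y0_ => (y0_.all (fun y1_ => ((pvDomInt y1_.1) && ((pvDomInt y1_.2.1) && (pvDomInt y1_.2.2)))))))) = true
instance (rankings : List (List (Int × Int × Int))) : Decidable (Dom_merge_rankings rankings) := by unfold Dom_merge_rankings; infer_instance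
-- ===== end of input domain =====

-- B replaces A's running score/val accumulator by an explicit split of each rank into maximal
-- runs of equal score, each run keyed by its index; B returns normally on empty ranks where A raises.

-- ===== PORT A =====
-- one step of A's inner loop over rank: state (single, val, score)
def pvStepA (st : List (Int × Int × Int) × Int × Int) (t : Int × Int × Int) :
    List (Int × Int × Int) × Int × Int :=
  let single := st.1
  let val := st.2.1
  let score := st.2.2
  if t.1 ≠ score then (single ++ [(val - 1, t.2.1, t.2.2)], val - 1, t.1)
  else (single ++ [(val, t.2.1, t.2.2)], val, score)

def merge_rankings (rankings : List (List (Int × Int × Int))) : List (Int × Int × Int) :=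
  rankings.foldl (fun single rank =>
    match rank with
    | [] => single   -- Python raises IndexError at rank[0][0]; excluded by Pre_merge_rankings
    | x :: _ => (rank.foldl pvStepA (single, 2 ^ 64, x.1)).1) []

-- ===== PORT B =====
-- split a rank into maximal runs of equal first component (B's `groups` helper)
def pvGroups : List (Int × Int × Int) → List (List (Int × Int × Int))
  | [] => []
  | x :: xs =>
    (x :: xs.takeWhile (fun y => y.1 == x.1)) :: pvGroups (xs.dropWhile (fun y => y.1 == x.1))
termination_by l => l.length
decreasing_by simpa using Nat.lt_succ_of_le (List.length_dropWhile_le _ _)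

def merge_rankings_alt (rankings : List (List (Int × Int × Int))) : List (Int × Int × Int) :=
  rankings.foldl (fun single rank =>
    single ++ (pvGroups rank).zipIdx.flatMap
      (fun p => p.1.map (fun t => ((2 : Int) ^ 64 - (p.2 : Int), t.2.1, t.2.2)))) []

-- ===== PRECONDITION & SPEC =====
-- Pre_ excludes exactly the inputs on which A raises IndexError (some rank is empty: rank[0][0]).
def Pre_merge_rankings (rankings : List (List (Int × Int × Int))) : Prop :=
  ∀ rank ∈ rankings, rank ≠ []
instance (rankings : List (List (Int × Int × Int))) : Decidable (Pre_merge_rankings rankings) := by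
  unfold Pre_merge_rankings; infer_instance
def pvWitness_merge_rankings : (List (List (Int × Int × Int))) :=
  [[(3, 1, 2), (3, 4, 5), (1, 6, 7)], [(0, 0, 0)]]

def Spec_merge_rankings (rankings : List (List (Int × Int × Int))) (out : List (Int × Int × Int)) : Prop := out = merge_rankings_alt rankings
instance (rankings : List (List (Int × Int × Int))) (out : List (Int × Int × Int)) : Decidable (Spec_merge_rankings rankings out) := by unfold Spec_merge_rankings; infer_instance

-- ===== CLAIM (what is proved, stated in full; the proofs are below) =====
def Claim_equal_merge_rankings : Prop := ∀ (rankings : List (List (Int × Int × Int))), Dom_merge_rankings rankings → Pre_merge_rankings rankings → Spec_merge_rankings rankings (merge_rankings rankings)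

-- ===== LEMMAS AND PROOFS =====

-- spec of A's inner loop as a recursive function
def pvF (val score : Int) : List (Int × Int × Int) → List (Int × Int × Int)
  | [] => []
  | t :: xs =>
    if t.1 ≠ score then (val - 1, t.2.1, t.2.2) :: pvF (val - 1) t.1 xs
    else (val, t.2.1, t.2.2) :: pvF val score xs

-- spec of B's grouped output: groups get values val, val-1, …
def pvB (val : Int) : List (List (Int × Int × Int)) → List (Int × Int × Int)
  | [] => []
  | g :: gs => g.map (fun t => (val, t.2.1, t.2.2)) ++ pvB (val - 1) gs

lemma foldl_pvStepA (rank : List (Int × Int × Int)) :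
    ∀ (acc : List (Int × Int × Int)) (val score : Int),
      (rank.foldl pvStepA (acc, val, score)).1 = acc ++ pvF val score rank := by
  induction rank with
  | nil => intro acc val score; simp [pvF]
  | cons t xs ih =>
    intro acc val score
    by_cases h : t.1 = score
    · simp [List.foldl_cons, pvStepA, h, ih, pvF]
    · simp [List.foldl_cons, pvStepA, h, ih, pvF]

lemma pvB_zipIdx (gs : List (List (Int × Int × Int))) :
    ∀ (k : Nat) (base : Int),
      (gs.zipIdx k).flatMap
        (fun p => p.1.map (fun t => (base - (p.2 : Int), t.2.1, t.2.2)))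
      = pvB (base - k) gs := by
  induction gs with
  | nil => intro k base; simp [pvB]
  | cons g gs ih =>
    intro k base
    rw [List.zipIdx_cons]
    simp only [List.flatMap_cons, pvB]
    have := ih (k + 1) base
    have hk : base - ((k : Int) + 1) = base - k - 1 := by ring
    rw [this]
    push_cast
    rw [hk]

lemma pvF_run (run : List (Int × Int × Int)) :
    ∀ (rest : List (Int × Int × Int)) (val score : Int),
      (∀ t ∈ run, t.1 = score) →
      pvF val score (run ++ rest)
        = run.map (fun t => (val, t.2.1, t.2.2)) ++ pvF val score rest := by
  induction run with
  | nil => intro rest val score _; simp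
  | cons t ts ih =>
    intro rest val score h
    have ht : t.1 = score := h t (by simp)
    simp only [List.cons_append, pvF, ht, ne_eq, not_true_eq_false, if_false]
    rw [ih rest val score (fun u hu => h u (by simp [hu]))]
    simp

lemma dropWhile_head_not {p : (Int × Int × Int) → Bool} {xs : List (Int × Int × Int)}
    {y : Int × Int × Int} {ys : List (Int × Int × Int)}
    (h : xs.dropWhile p = y :: ys) : p y = false := by
  induction xs with
  | nil => simp [List.dropWhile] at h
  | cons a as ih =>
    rw [List.dropWhile_cons] at h
    by_cases hpa : p a = true
    · rw [if_pos hpa] at h; exact ih h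
    · rw [if_neg hpa] at h; cases h; simpa using hpa

lemma pvF_groups (rank : List (Int × Int × Int)) :
    ∀ (val : Int) (x : Int × Int × Int) (xs : List (Int × Int × Int)),
      rank = x :: xs → pvF val x.1 rank = pvB val (pvGroups rank) := by
  induction rank using pvGroups.induct with
  | case1 => intro val x xs h; cases h
  | case2 x xs ih =>
    intro val x' xs' h
    injection h with h1 h2
    subst h1; subst h2
    rw [pvGroups]
    set p : (Int × Int × Int) → Bool := fun y => y.1 == x.1 with hp
    have hsplit : x :: xs = (x :: xs.takeWhile p) ++ xs.dropWhile p := by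
      simp [List.takeWhile_append_dropWhile]
    have hrun : ∀ t ∈ x :: xs.takeWhile p, t.1 = x.1 := by
      intro t ht
      rcases List.mem_cons.mp ht with rfl | ht'
      · rfl
      · have := List.mem_takeWhile_imp ht'
        simpa [hp] using this
    rw [hsplit, pvF_run _ _ _ _ hrun, pvB]
    congr 1
    cases hrest : xs.dropWhile p with
    | nil => simp [pvF, pvGroups, pvB]
    | cons y ys =>
      have hy : y.1 ≠ x.1 := by
        have := dropWhile_head_not (p := p) hrest
        simpa [hp] using this
      have step : pvF val x.1 (y :: ys) = pvF (val - 1) y.1 (y :: ys) := by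
        rw [pvF, pvF]
        simp [hy]
      rw [hrest] at ih
      rw [step]
      exact ih (val - 1) y ys rfl

lemma pvB_zipIdx0 (gs : List (List (Int × Int × Int))) (base : Int) :
    gs.zipIdx.flatMap (fun p => p.1.map (fun t => (base - (p.2 : Int), t.2.1, t.2.2)))
      = pvB base gs := by
  have h := pvB_zipIdx gs 0 base
  simpa using h

lemma perRank (x : Int × Int × Int) (xs : List (Int × Int × Int))
    (acc : List (Int × Int × Int)) :
    (xs.foldl pvStepA (pvStepA (acc, 2 ^ 64, x.1) x)).1
      = acc ++ (pvGroups (x :: xs)).zipIdx.flatMap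
          (fun p => p.1.map (fun t => ((2 : Int) ^ 64 - (p.2 : Int), t.2.1, t.2.2))) := by
  have h0 : (xs.foldl pvStepA (pvStepA (acc, 2 ^ 64, x.1) x))
      = ((x :: xs).foldl pvStepA (acc, 2 ^ 64, x.1)) := rfl
  rw [h0, foldl_pvStepA, pvF_groups (x :: xs) (2 ^ 64) x xs rfl, ← pvB_zipIdx0]

lemma merge_eq (rankings : List (List (Int × Int × Int))) :
    ∀ acc : List (Int × Int × Int), (∀ rank ∈ rankings, rank ≠ []) →
      rankings.foldl (fun single rank =>
        match rank with
        | [] => single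
        | x :: _ => (rank.foldl pvStepA (single, 2 ^ 64, x.1)).1) acc
      = rankings.foldl (fun single rank =>
          single ++ (pvGroups rank).zipIdx.flatMap
            (fun p => p.1.map (fun t => ((2 : Int) ^ 64 - (p.2 : Int), t.2.1, t.2.2)))) acc := by
  induction rankings with
  | nil => intro acc _; rfl
  | cons rank rest ih =>
    intro acc h
    have hne : rank ≠ [] := h rank (by simp)
    obtain ⟨x, xs, rfl⟩ := List.exists_cons_of_ne_nil hne
    simp only [List.foldl_cons]
    rw [perRank x xs acc]
    exact ih _ (fun r hr => h r (by simp [hr]))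

-- ===== VERDICT (by name: the statement is the Claim_ definition above) =====
theorem merge_rankings_spec : Claim_equal_merge_rankings := by
  intro rankings _ hpre
  unfold Spec_merge_rankings merge_rankings merge_rankings_alt
  exact merge_eq rankings [] hpre
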